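-- pv_equiv track=rewrite | github.com/westreed/ProgrammersAlgorithm | Programmers/Level3/억억단을 외우자.py | solution
-- ===== SOURCE A (Python) =====
-- def find(counts, desc, start):
--     for d in desc:
--         nums = counts[d]
--         for i in nums:
--             if i >= start:
--                 return i
--
-- def solution(e, starts):
--     from collections import defaultdict
--     divisor = [0 for _ in range(e+1)]
--     counts = defaultdict(list)
--     divisor[1] = 1
--
--     # 파이썬으로 통과하고 싶으면, 아래의 최적화 기법으로 계산해야됨.
--     # for i in range(1, int(e**0.5)+1):
--     #     divisor[i**2] += 1
--
--     # 이부분은 이해가 안됨...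
--     # for i in range(2,e+1):
--     #     for j in range(1,min(e//i+1,i)):
--     #         divisor[i*j] += 2
--
--     for i in range(2, e+1):
--         for j in range(1, e//i+1):
--             divisor[i*j] += 1
--
--     for i in range(1, e+1):
--         counts[divisor[i]].append(i)
--
--     desc = sorted(counts.keys(), reverse=True)
--     answer = []
--     for start in starts:
--         res = find(counts, desc, start)
--         answer.append(res)
--
--     return answer
-- ===== SOURCE B (Python) =====
-- def solution(e, starts):
--     # same divisor-count sieve as before, then one suffix pass: best[n] = the
--     # number in [n, e] with the highest count (ties -> smallest), so each query
--     # is a single table lookup instead of a scan over count buckets.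
--     divisor = [0] * (e + 1)
--     divisor[1] = 1
--     for i in range(2, e + 1):
--         for j in range(1, e // i + 1):
--             divisor[i * j] += 1
--     best = [0] * (e + 2)
--     best[e] = e
--     for n in range(e - 1, 0, -1):
--         best[n] = n if divisor[n] >= divisor[best[n + 1]] else best[n + 1]
--     answer = []
--     for start in starts:
--         s = max(start, 1)
--         answer.append(best[s] if s <= e else None)
--     return answer
-- ===== Notes on version B (the rewrite author's own statement) =====
-- stated objective: faster
-- what changed: Instead of bucketing numbers by divisor count into a dict, sorting the counts descending and scanning the buckets for every query, B makes one backward suffix pass computing best[n] = number in [n,e] with maximal divisor count (ties -> smallest), so each query is an O(1) table lookup.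
-- outside the precondition, e.g. on solution(5, [7]): A returns [None], B returns [None]
import Mathlib
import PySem

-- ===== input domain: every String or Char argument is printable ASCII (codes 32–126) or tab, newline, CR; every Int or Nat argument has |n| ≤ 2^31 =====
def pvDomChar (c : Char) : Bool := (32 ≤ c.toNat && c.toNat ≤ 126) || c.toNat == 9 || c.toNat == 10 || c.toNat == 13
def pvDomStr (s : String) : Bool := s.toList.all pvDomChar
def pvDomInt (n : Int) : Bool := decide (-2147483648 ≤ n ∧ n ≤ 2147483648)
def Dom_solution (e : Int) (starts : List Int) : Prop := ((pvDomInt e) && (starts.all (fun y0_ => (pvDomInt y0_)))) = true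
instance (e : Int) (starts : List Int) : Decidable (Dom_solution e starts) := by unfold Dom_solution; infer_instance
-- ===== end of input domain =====

-- B replaces A's per-query scan over divisor-count buckets by one backward suffix pass
-- (best[n] = number in [n,e] with maximal count, ties -> smallest) and O(1) lookups per query.

-- ===== PORT A =====
-- the divisor-count sieve is textually identical in both Pythons; ported once, used by both ports
def pvDivisors (e : Int) : Array Int :=
  let dv : Array Int := Array.replicate (e+1).toNat 0
  let dv := dv.setIfInBounds 1 1
  (PySem.List.pyRange 2 (e+1) 1).foldl (fun dv i =>
    (PySem.List.pyRange 1 (PySem.Int.floordiv e i + 1) 1).foldl (fun dv j =>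
      dv.setIfInBounds (i*j).toNat (dv.getD (i*j).toNat 0 + 1)) dv) dv

-- inner 'for i in nums: if i >= start: return i' of A's helper find
def findInner (nums : List Int) (start : Int) : Option Int :=
  match nums with
  | [] => none
  | i :: t => if i ≥ start then some i else findInner t start

-- A's helper find (returns None when no number ≥ start exists; Pre_ excludes that)
def find (counts : PySem.Dict Int (List Int)) (desc : List Int) (start : Int) : Option Int :=
  match desc with
  | [] => none
  | d :: rest =>
    match findInner (counts.getD d []) start with
    | some i => some i
    | none => find counts rest start

def solution (e : Int) (starts : List Int) : List Int :=
  let divisor := pvDivisors e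
  let counts : PySem.Dict Int (List Int) :=
    (PySem.List.pyRange 1 (e+1) 1).foldl
      (fun c i => c.modify (divisor.getD i.toNat 0) [] (fun l => l ++ [i])) PySem.Dict.empty
  let desc := PySem.List.sorted counts.keys (fun x => x) true
  -- answer.append(res); res is always 'some' under Pre_, .getD 0 totalises the port
  starts.foldl (fun answer start => answer ++ [(find counts desc start).getD 0]) []

-- ===== PORT B =====
def solution_alt (e : Int) (starts : List Int) : List Int :=
  let divisor := pvDivisors e
  let best : Array Int := Array.replicate (e+2).toNat 0
  let best := best.setIfInBounds e.toNat e
  let best := (PySem.List.pyRange (e-1) 0 (-1)).foldl (fun b n =>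
      b.setIfInBounds n.toNat
        (if divisor.getD n.toNat 0 ≥
              divisor.getD (b.getD (n+1).toNat 0).toNat 0
         then n else b.getD (n+1).toNat 0)) best
  -- answer.append(best[s] if s <= e else None); the None arm (s > e, excluded by Pre_) is defaulted to 0
  starts.map (fun start =>
    let s := max start 1
    if s ≤ e then best.getD s.toNat 0 else 0)

-- ===== PRECONDITION & SPEC =====
-- Pre_ excludes e ≤ 0 (A raises IndexError on divisor[1]) and queries start > e
-- (A's find returns None there, so A's result is not a list of ints).
def Pre_solution (e : Int) (starts : List Int) : Prop := 1 ≤ e ∧ ∀ s ∈ starts, s ≤ e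
instance (e : Int) (starts : List Int) : Decidable (Pre_solution e starts) := by
  unfold Pre_solution; infer_instance
def pvWitness_solution : Int × List Int := (6, [1, 3, 6])

def Spec_solution (e : Int) (starts : List Int) (out : List Int) : Prop := out = solution_alt e starts
instance (e : Int) (starts : List Int) (out : List Int) : Decidable (Spec_solution e starts out) := by
  unfold Spec_solution; infer_instance

-- ===== CLAIM (what is proved, stated in full; the proofs are below) =====
def Claim_equal_solution : Prop := ∀ (e : Int) (starts : List Int), Dom_solution e starts → Pre_solution e starts → Spec_solution e starts (solution e starts)

-- ===== LEMMAS AND PROOFS =====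

-- the divisor count both programs attach to n (as stored in the shared sieve array)
def cnt (e n : Int) : Int := (pvDivisors e).getD n.toNat 0

-- the common specification value: the m ∈ [n, e] with maximal cnt, ties -> smallest m
def lm (e n : Int) : Int :=
  if h : e ≤ n then e
  else if cnt e (lm e (n+1)) ≤ cnt e n then n else lm e (n+1)
termination_by (e - n).toNat
decreasing_by omega

theorem lm_spec (e n : Int) (h : n ≤ e) :
    (n ≤ lm e n ∧ lm e n ≤ e) ∧
    (∀ k, n ≤ k → k ≤ e → cnt e k ≤ cnt e (lm e n) ∧ (cnt e k = cnt e (lm e n) → lm e n ≤ k)) := by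
  induction n using lm.induct e with
  | case1 n hle =>
    rw [lm]; simp only [hle, dite_true]
    constructor
    · omega
    · intro k hk1 hk2
      have : k = e := by omega
      subst this; exact ⟨le_refl _, fun _ => le_refl _⟩
  | case2 n hle hc ih =>
    have hne : n + 1 ≤ e := by omega
    obtain ⟨⟨hr1, hr2⟩, hmax⟩ := ih hne
    rw [lm]; simp only [hle, dite_false, hc, if_true]
    refine ⟨⟨by omega, by omega⟩, ?_⟩
    intro k hk1 hk2
    rcases eq_or_lt_of_le hk1 with heq | hlt
    · subst heq; exact ⟨le_refl _, fun _ => le_refl _⟩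
    · obtain ⟨h1, h2⟩ := hmax k (by omega) hk2
      exact ⟨by omega, fun _ => by omega⟩
  | case3 n hle hc ih =>
    have hne : n + 1 ≤ e := by omega
    obtain ⟨⟨hr1, hr2⟩, hmax⟩ := ih hne
    rw [lm]; simp only [hle, dite_false, hc, if_false]
    refine ⟨⟨by omega, hr2⟩, ?_⟩
    intro k hk1 hk2
    rcases eq_or_lt_of_le hk1 with heq | hlt
    · subst heq; exact ⟨by omega, fun hh => by omega⟩
    · obtain ⟨h1, h2⟩ := hmax k (by omega) hk2
      exact ⟨h1, h2⟩

-- the strict priority order in which A's flattened bucket scan lists the numbers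
def rBetter (e a b : Int) : Prop := cnt e b < cnt e a ∨ (cnt e a = cnt e b ∧ a < b)

theorem rBetter_asymm (e a b : Int) : rBetter e a b → rBetter e b a → False := by
  unfold rBetter; omega

theorem findInner_first (e : Int) (S : List Int) (start m : Int)
    (hp : S.Pairwise (rBetter e)) (hm : m ∈ S) (hms : start ≤ m)
    (hbest : ∀ k ∈ S, start ≤ k → k = m ∨ rBetter e m k) :
    findInner S start = some m := by
  induction S with
  | nil => cases hm
  | cons x t ih =>
    have hpx : ∀ y ∈ t, rBetter e x y := (List.pairwise_cons.mp hp).1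
    have hpt : t.Pairwise (rBetter e) := (List.pairwise_cons.mp hp).2
    unfold findInner
    by_cases hx : x ≥ start
    · simp only [hx, if_true]
      rcases hbest x (List.mem_cons_self) hx with heq | hr
      · rw [heq]
      · rcases List.mem_cons.mp hm with h1 | h2
        · rw [h1]
        · exact (rBetter_asymm e m x hr (hpx m h2)).elim
    · simp only [hx, if_false]
      have hmt : m ∈ t := by
        rcases List.mem_cons.mp hm with h1 | h2
        · subst h1; omega
        · exact h2
      exact ih hpt hmt (fun k hk => hbest k (List.mem_cons_of_mem _ hk))

theorem findInner_append (xs ys : List Int) (start : Int) :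
    findInner (xs ++ ys) start =
      match findInner xs start with
      | some i => some i
      | none => findInner ys start := by
  induction xs with
  | nil => rfl
  | cons x t ih =>
    simp only [List.cons_append]
    by_cases hx : x ≥ start
    · simp [findInner, hx]
    · simp [findInner, hx, ih]

theorem find_eq_flat (counts : PySem.Dict Int (List Int)) (desc : List Int) (start : Int) :
    find counts desc start = findInner (desc.flatMap (fun d => counts.getD d [])) start := by
  induction desc with
  | nil => rfl
  | cons d rest ih =>
    unfold find
    rw [List.flatMap_cons, findInner_append]
    cases hfi : findInner (counts.getD d []) start <;> simp only [ih]

-- A's counts-building loop, over an arbitrary list and count function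
def bucketsOf (c : Int → Int) (l : List Int) : PySem.Dict Int (List Int) :=
  l.foldl (fun dct i => dct.modify (c i) [] (fun lst => lst ++ [i])) PySem.Dict.empty

theorem bucketsOf_getD (c : Int → Int) (l : List Int) (d : Int) :
    (bucketsOf c l).getD d [] = l.filter (fun i => c i == d) := by
  induction l using List.reverseRecOn with
  | nil => rfl
  | append_singleton t x ih =>
    unfold bucketsOf at ih ⊢
    rw [List.foldl_append, List.foldl_cons, List.foldl_nil, List.filter_append,
        PySem.Dict.getD_modify]
    by_cases hdx : d = c x
    · subst hdx; rw [if_pos rfl, ih]; simp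
    · rw [if_neg hdx, ih]
      have : (c x == d) = false := by simp [Ne.symm hdx]
      simp [List.filter, this]

theorem bucketsOf_keys (c : Int → Int) (l : List Int) :
    (bucketsOf c l).keys = PySem.Set.ofList (l.map c) := by
  induction l using List.reverseRecOn with
  | nil => rfl
  | append_singleton t x ih =>
    unfold bucketsOf at ih ⊢
    rw [List.foldl_append, List.foldl_cons, List.foldl_nil, List.map_append,
        PySem.Dict.keys_modify, List.map_singleton, PySem.Set.ofList_append_singleton,
        PySem.Set.add_eq_ite, ← ih]
    by_cases hc : (List.foldl (fun dct i => dct.modify (c i) [] fun lst => lst ++ [i]) PySem.Dict.empty t).contains (c x) = true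
    · rw [PySem.Dict.keys_insert_of_contains _ _ hc,
          if_pos ((PySem.Dict.contains_iff_mem_keys _ _).mp hc)]
    · have hc' : _ = false := Bool.eq_false_iff.mpr hc
      rw [PySem.Dict.keys_insert_of_not_contains _ _ hc',
          if_neg (fun hmem => hc ((PySem.Dict.contains_iff_mem_keys _ _).mpr hmem))]

-- indexing a set-updated array at nonnegative Int indices (Python's b[i] = v; b[k])
theorem arr_getD_set (a : Array Int) (i k v : Int) (h0 : 0 ≤ i) (hi : i < (a.size : Int))
    (h0k : 0 ≤ k) :
    (a.setIfInBounds i.toNat v).getD k.toNat 0 = if k = i then v else a.getD k.toNat 0 := by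
  rw [Array.getD_eq_getD_getElem?, Array.getD_eq_getD_getElem?, Array.getElem?_setIfInBounds]
  by_cases hk : k = i
  · rw [if_pos hk, if_pos (by omega), if_pos (by omega), Option.getD_some]
  · rw [if_neg hk, if_neg (by omega)]

-- B's suffix loop computes lm at every index
theorem B_loop (e : Int) (lo : Int) (b : Array Int) (h1 : 1 ≤ lo) (h2 : lo ≤ e)
    (hlen : b.size = (e+2).toNat)
    (hb : ∀ k, lo ≤ k → k ≤ e → b.getD k.toNat 0 = lm e k) :
    ∀ k, 1 ≤ k → k ≤ e →
      ((PySem.List.pyRange (lo-1) 0 (-1)).foldl (fun b n =>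
          b.setIfInBounds n.toNat
            (if (pvDivisors e).getD n.toNat 0 ≥
                  (pvDivisors e).getD (b.getD (n+1).toNat 0).toNat 0
             then n else b.getD (n+1).toNat 0)) b).getD k.toNat 0 = lm e k := by
  intro k hk1 hk2
  rcases eq_or_lt_of_le h1 with heq | hlt
  · rw [show lo - 1 = 0 by omega, PySem.List.pyRange_neg_one_eq_nil le_rfl, List.foldl_nil]
    exact hb k (by omega) hk2
  · rw [PySem.List.pyRange_neg_one_cons (show (0:Int) < lo-1 by omega), List.foldl_cons]
    have hgb : b.getD (lo-1+1).toNat 0 = lm e lo := by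
      rw [show lo-1+1 = lo by ring]; exact hb lo le_rfl h2
    refine B_loop e (lo-1) _ (by omega) (by omega) ?_ ?_ k hk1 hk2
    · rw [Array.size_setIfInBounds]; exact hlen
    · intro k' hk1' hk2'
      rw [arr_getD_set _ _ _ _ (by omega) (by omega) (by omega)]
      · by_cases hke : k' = lo - 1
        · rw [if_pos hke, hgb, hke]
          conv_rhs => rw [lm]
          rw [dif_neg (show ¬ e ≤ lo - 1 by omega), show lo - 1 + 1 = lo by ring]
          unfold cnt
          simp only [ge_iff_le]
        · rw [if_neg hke]; exact hb k' (by omega) hk2'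
termination_by lo.toNat
decreasing_by omega

-- per-query value of A
theorem A_query (e start : Int) (he : 1 ≤ e) (hs : start ≤ e) :
    (find (bucketsOf (cnt e) (PySem.List.pyRange 1 (e+1) 1))
          (PySem.List.sorted (bucketsOf (cnt e) (PySem.List.pyRange 1 (e+1) 1)).keys (fun x => x) true)
          start).getD 0 = lm e (max start 1) := by
  set rng := PySem.List.pyRange 1 (e+1) 1 with hrng
  set counts := bucketsOf (cnt e) rng with hcounts
  set desc := PySem.List.sorted counts.keys (fun x => x) true with hdescdef
  set lo := max start 1 with hlo
  have hlo_cases : lo = start ∨ lo = 1 := by omega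
  have hlo1 : 1 ≤ lo := by omega
  have hloe : lo ≤ e := by omega
  have hslo : start ≤ lo := by omega
  obtain ⟨⟨hm1, hm2⟩, hmax⟩ := lm_spec e lo hloe
  set m := lm e lo with hmdef
  have hkeys : counts.keys = PySem.Set.ofList (rng.map (cnt e)) := bucketsOf_keys _ _
  have hdesc_mem : ∀ d, d ∈ desc ↔ ∃ i ∈ rng, cnt e i = d := by
    intro d
    rw [hdescdef, PySem.List.mem_sorted, hkeys, PySem.Set.mem_ofList, List.mem_map]
  have hdesc_strict : desc.Pairwise (fun a b => b < a) := by
    have h1 : desc.Pairwise (fun a b => b ≤ a) := PySem.List.sorted_pairwise_rev _ _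
    have h2 : desc.Nodup := by
      refine (PySem.List.sorted_perm counts.keys (fun x => x) true).symm.nodup ?_
      rw [hkeys]; exact PySem.Set.nodup_ofList _
    exact (h1.and h2).imp (fun hab => lt_of_le_of_ne hab.1 (Ne.symm hab.2))
  have hbucket : ∀ d, counts.getD d [] = rng.filter (fun i => cnt e i == d) :=
    fun d => bucketsOf_getD _ _ _
  have hbmem : ∀ d i, i ∈ counts.getD d [] ↔ (i ∈ rng ∧ cnt e i = d) := by
    intro d i; rw [hbucket d, List.mem_filter]; simp
  have hrngmem : ∀ i : Int, i ∈ rng ↔ 1 ≤ i ∧ i < e + 1 := fun i => PySem.List.mem_pyRange_one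
  set S := desc.flatMap (fun d => counts.getD d []) with hS
  have hSmem : ∀ i, i ∈ S ↔ (1 ≤ i ∧ i < e + 1) := by
    intro i
    rw [hS, List.mem_flatMap]
    constructor
    · rintro ⟨d, _, hid⟩
      exact (hrngmem i).mp ((hbmem d i).mp hid).1
    · intro hi
      refine ⟨cnt e i, ?_, ?_⟩
      · exact (hdesc_mem _).mpr ⟨i, (hrngmem i).mpr hi, rfl⟩
      · exact (hbmem _ i).mpr ⟨(hrngmem i).mpr hi, rfl⟩
  have hSpair : S.Pairwise (rBetter e) := by
    rw [hS, List.flatMap_def, List.pairwise_flatten]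
    constructor
    · intro l hl
      rw [List.mem_map] at hl
      obtain ⟨d, _, rfl⟩ := hl
      have hasc : (counts.getD d []).Pairwise (· < ·) := by
        rw [hbucket d]
        exact List.Pairwise.sublist List.filter_sublist (PySem.List.pairwise_lt_pyRange_one 1 (e+1))
      refine hasc.imp_of_mem ?_
      intro a b ha hb hab
      exact Or.inr ⟨(((hbmem d a).mp ha).2).trans (((hbmem d b).mp hb).2).symm, hab⟩
    · rw [List.pairwise_map]
      refine hdesc_strict.imp_of_mem ?_
      intro d1 d2 _ _ hlt x hx y hy
      refine Or.inl ?_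
      rw [((hbmem d1 x).mp hx).2, ((hbmem d2 y).mp hy).2]
      exact hlt
  have hfind : findInner S start = some m := by
    refine findInner_first e S start m hSpair ((hSmem m).mpr ⟨by omega, by omega⟩) (by omega) ?_
    intro k hk hks
    have hk' := (hSmem k).mp hk
    have hlok : lo ≤ k := by rcases hlo_cases with h | h <;> omega
    obtain ⟨hc1, hc2⟩ := hmax k hlok (by omega)
    by_cases hkm : k = m
    · exact Or.inl hkm
    · refine Or.inr ?_
      rcases lt_or_eq_of_le hc1 with h | h
      · exact Or.inl h
      · exact Or.inr ⟨h.symm, lt_of_le_of_ne (hc2 h) (fun hh => hkm hh.symm)⟩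
  rw [find_eq_flat, ← hS, hfind]
  rfl

-- per-query value of B
theorem B_query (e start : Int) (he : 1 ≤ e) (hs : start ≤ e) :
    (let s := max start 1
     if s ≤ e then
       ((PySem.List.pyRange (e-1) 0 (-1)).foldl (fun b n =>
          b.setIfInBounds n.toNat
            (if (pvDivisors e).getD n.toNat 0 ≥
                  (pvDivisors e).getD (b.getD (n+1).toNat 0).toNat 0
             then n else b.getD (n+1).toNat 0))
          ((Array.replicate (e+2).toNat 0).setIfInBounds e.toNat e)).getD s.toNat 0
     else 0)
    = lm e (max start 1) := by
  have hlen : ((Array.replicate (e+2).toNat (0:Int)).setIfInBounds e.toNat e).size = (e+2).toNat := by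
    rw [Array.size_setIfInBounds, Array.size_replicate]
  have hb0 : ∀ k, e ≤ k → k ≤ e →
      ((Array.replicate (e+2).toNat (0:Int)).setIfInBounds e.toNat e).getD k.toNat 0 = lm e k := by
    intro k hk1 hk2
    have hk : k = e := le_antisymm hk2 hk1
    subst hk
    rw [arr_getD_set _ _ _ _ (by omega) (by rw [Array.size_replicate]; omega) (by omega),
        if_pos rfl, lm, dif_pos le_rfl]
  have hmain := B_loop e e ((Array.replicate (e+2).toNat 0).setIfInBounds e.toNat e)
      he le_rfl hlen hb0
  simp only
  rw [if_pos (show max start 1 ≤ e by omega)]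
  exact hmain (max start 1) (by omega) (by omega)

-- ===== VERDICT (by name: the statement is the Claim_ definition above) =====
theorem solution_spec : Claim_equal_solution := by
  intro e starts _hdom hpre
  obtain ⟨he, hst⟩ := hpre
  simp only [Spec_solution, solution, solution_alt]
  rw [PySem.List.foldl_append_singleton_eq_map, List.nil_append]
  refine List.map_congr_left ?_
  intro s hs
  exact (A_query e s he (hst s hs)).trans (B_query e s he (hst s hs)).symm
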